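-- pv_equiv track=rewrite | github.com/jayminwest/kotadb | automation/adws/scripts/analyze_github_workflow_patterns.py | analyze_commit_distribution
-- ===== SOURCE A (Python) =====
-- from typing import List, Dict, Any, Optional
--
-- def analyze_commit_distribution(commits: List[int]) -> Dict[str, int]:
--     """Categorize commit counts into buckets."""
--     distribution = {
--         "1": 0,
--         "2-3": 0,
--         "4-5": 0,
--         "6-10": 0,
--         "11+": 0
--     }
--
--     for count in commits:
--         if count == 1:
--             distribution["1"] += 1
--         elif 2 <= count <= 3:
--             distribution["2-3"] += 1
--         elif 4 <= count <= 5: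
--             distribution["4-5"] += 1
--         elif 6 <= count <= 10:
--             distribution["6-10"] += 1
--         else:
--             distribution["11+"] += 1
--
--     return distribution
-- ===== SOURCE B (Python) =====
-- def analyze_commit_distribution(commits):
--     """Categorize commit counts into buckets (one counting pass per bucket)."""
--     n1 = sum(1 for c in commits if c == 1)
--     n23 = sum(1 for c in commits if 2 <= c <= 3)
--     n45 = sum(1 for c in commits if 4 <= c <= 5)
--     n610 = sum(1 for c in commits if 6 <= c <= 10)
--     return {
--         "1": n1,
--         "2-3": n23,
--         "4-5": n45,
--         "6-10": n610,
--         "11+": len(commits) - n1 - n23 - n45 - n610,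
--     }
-- ===== Notes on version B (the rewrite author's own statement) =====
-- stated objective: alternative
-- what changed: Replaces the single pass with an if/elif cascade updating a mutable dict by four independent range-predicate counts (one per bucket), with the '11+' bucket computed as the total minus the other four so out-of-range counts (<=0) still land there.
import Mathlib
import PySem

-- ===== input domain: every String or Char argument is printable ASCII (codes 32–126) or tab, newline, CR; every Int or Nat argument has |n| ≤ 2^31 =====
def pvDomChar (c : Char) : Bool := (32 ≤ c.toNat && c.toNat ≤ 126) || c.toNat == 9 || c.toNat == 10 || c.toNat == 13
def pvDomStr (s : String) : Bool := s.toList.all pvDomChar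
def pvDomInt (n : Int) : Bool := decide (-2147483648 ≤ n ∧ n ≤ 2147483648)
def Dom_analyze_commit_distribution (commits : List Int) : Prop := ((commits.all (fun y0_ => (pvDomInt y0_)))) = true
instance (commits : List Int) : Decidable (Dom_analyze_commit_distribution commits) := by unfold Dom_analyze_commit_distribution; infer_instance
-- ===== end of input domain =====

-- B recomputes the distribution as four independent range-predicate counts plus a length-minus-others catch-all, instead of A's single fold with an if/elif cascade over a mutable dict (alternative decomposition, same cost).


-- ===== PORT A =====
def pvInitDist : PySem.Dict String Int :=
  PySem.Dict.ofList [("1", 0), ("2-3", 0), ("4-5", 0), ("6-10", 0), ("11+", 0)]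

def pvStep (d : PySem.Dict String Int) (count : Int) : PySem.Dict String Int :=
  if count = 1 then d.modify "1" 0 (· + 1)
  else if 2 ≤ count ∧ count ≤ 3 then d.modify "2-3" 0 (· + 1)
  else if 4 ≤ count ∧ count ≤ 5 then d.modify "4-5" 0 (· + 1)
  else if 6 ≤ count ∧ count ≤ 10 then d.modify "6-10" 0 (· + 1)
  else d.modify "11+" 0 (· + 1)

def analyze_commit_distribution (commits : List Int) : List (String × Int) :=
  (commits.foldl pvStep pvInitDist).items

-- ===== PORT B =====
def analyze_commit_distribution_alt (commits : List Int) : List (String × Int) :=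
  let n1 : Int := commits.countP (fun c => c == 1)
  let n23 : Int := commits.countP (fun c => 2 ≤ c && c ≤ 3)
  let n45 : Int := commits.countP (fun c => 4 ≤ c && c ≤ 5)
  let n610 : Int := commits.countP (fun c => 6 ≤ c && c ≤ 10)
  [("1", n1), ("2-3", n23), ("4-5", n45), ("6-10", n610),
   ("11+", (commits.length : Int) - n1 - n23 - n45 - n610)]

-- ===== PRECONDITION & SPEC =====
def Spec_analyze_commit_distribution (commits : List Int) (out : List (String × Int)) : Prop := out = analyze_commit_distribution_alt commits
instance (commits : List Int) (out : List (String × Int)) : Decidable (Spec_analyze_commit_distribution commits out) := by unfold Spec_analyze_commit_distribution; infer_instance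

-- ===== CLAIM (what is proved, stated in full; the proofs are below) =====
def Claim_equal_analyze_commit_distribution : Prop := ∀ (commits : List Int), Dom_analyze_commit_distribution commits → Spec_analyze_commit_distribution commits (analyze_commit_distribution commits)

-- ===== LEMMAS AND PROOFS =====

-- ===== VERDICT (by name: the statement is the Claim_ definition above) =====

-- one-step effect of each branch of pvStep on the literal dict
lemma pv_mod1 (a b c d e : Int) :
    (PySem.Dict.mk [("1",a),("2-3",b),("4-5",c),("6-10",d),("11+",e)]).modify "1" 0 (· + 1) =
    PySem.Dict.mk [("1",a+1),("2-3",b),("4-5",c),("6-10",d),("11+",e)] := by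
  simp [PySem.Dict.modify, PySem.Dict.insert, PySem.Dict.getD, PySem.Dict.get?, PySem.Dict.contains]

lemma pv_mod2 (a b c d e : Int) :
    (PySem.Dict.mk [("1",a),("2-3",b),("4-5",c),("6-10",d),("11+",e)]).modify "2-3" 0 (· + 1) =
    PySem.Dict.mk [("1",a),("2-3",b+1),("4-5",c),("6-10",d),("11+",e)] := by
  simp [PySem.Dict.modify, PySem.Dict.insert, PySem.Dict.getD, PySem.Dict.get?, PySem.Dict.contains]

lemma pv_mod3 (a b c d e : Int) :
    (PySem.Dict.mk [("1",a),("2-3",b),("4-5",c),("6-10",d),("11+",e)]).modify "4-5" 0 (· + 1) =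
    PySem.Dict.mk [("1",a),("2-3",b),("4-5",c+1),("6-10",d),("11+",e)] := by
  simp [PySem.Dict.modify, PySem.Dict.insert, PySem.Dict.getD, PySem.Dict.get?, PySem.Dict.contains]

lemma pv_mod4 (a b c d e : Int) :
    (PySem.Dict.mk [("1",a),("2-3",b),("4-5",c),("6-10",d),("11+",e)]).modify "6-10" 0 (· + 1) =
    PySem.Dict.mk [("1",a),("2-3",b),("4-5",c),("6-10",d+1),("11+",e)] := by
  simp [PySem.Dict.modify, PySem.Dict.insert, PySem.Dict.getD, PySem.Dict.get?, PySem.Dict.contains]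

lemma pv_mod5 (a b c d e : Int) :
    (PySem.Dict.mk [("1",a),("2-3",b),("4-5",c),("6-10",d),("11+",e)]).modify "11+" 0 (· + 1) =
    PySem.Dict.mk [("1",a),("2-3",b),("4-5",c),("6-10",d),("11+",e+1)] := by
  simp [PySem.Dict.modify, PySem.Dict.insert, PySem.Dict.getD, PySem.Dict.get?, PySem.Dict.contains]

-- invariant of A's loop: the dict carries the running bucket counts
lemma pv_loop (l : List Int) (a b c d e : Int) :
    (l.foldl pvStep (PySem.Dict.mk [("1",a),("2-3",b),("4-5",c),("6-10",d),("11+",e)])) =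
    PySem.Dict.mk
      [("1", a + (l.countP (fun c => c == 1) : Int)),
       ("2-3", b + (l.countP (fun c => 2 ≤ c && c ≤ 3) : Int)),
       ("4-5", c + (l.countP (fun c => 4 ≤ c && c ≤ 5) : Int)),
       ("6-10", d + (l.countP (fun c => 6 ≤ c && c ≤ 10) : Int)),
       ("11+", e + (l.countP (fun c => !(c == 1) && !(2 ≤ c && c ≤ 3) && !(4 ≤ c && c ≤ 5) && !(6 ≤ c && c ≤ 10)) : Int))] := by
  induction l generalizing a b c d e with
  | nil => simp
  | cons x xs ih =>
    simp only [List.foldl_cons, pvStep]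
    split_ifs with h1 h2 h3 h4 <;>
      [rw [pv_mod1, ih]; rw [pv_mod2, ih]; rw [pv_mod3, ih]; rw [pv_mod4, ih]; rw [pv_mod5, ih]] <;>
      simp only [List.countP_cons, beq_iff_eq, beq_eq_false_iff_ne, Bool.and_eq_true,
        Bool.not_eq_true', Bool.and_eq_false_iff, decide_eq_true_eq, decide_eq_false_iff_not,
        PySem.Dict.mk.injEq, List.cons.injEq, Prod.mk.injEq, and_true, true_and] <;>
      split_ifs <;> push_cast <;> omega

-- the five buckets partition the list
lemma pv_total (l : List Int) :
    l.countP (fun c => c == 1) + l.countP (fun c => 2 ≤ c && c ≤ 3) +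
    l.countP (fun c => 4 ≤ c && c ≤ 5) + l.countP (fun c => 6 ≤ c && c ≤ 10) +
    l.countP (fun c => !(c == 1) && !(2 ≤ c && c ≤ 3) && !(4 ≤ c && c ≤ 5) && !(6 ≤ c && c ≤ 10)) = l.length := by
  induction l with
  | nil => simp
  | cons x xs ih =>
    simp only [List.countP_cons, List.length_cons, beq_iff_eq, beq_eq_false_iff_ne, Bool.and_eq_true, Bool.not_eq_true',
      Bool.and_eq_false_iff, decide_eq_true_eq, decide_eq_false_iff_not] at ih ⊢
    split_ifs <;> omega

-- ===== VERDICT (by name: the statement is the Claim_ definition above) =====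
theorem analyze_commit_distribution_spec : Claim_equal_analyze_commit_distribution := by
  intro commits _
  unfold Spec_analyze_commit_distribution analyze_commit_distribution analyze_commit_distribution_alt
  have hinit : pvInitDist = PySem.Dict.mk [("1",0),("2-3",0),("4-5",0),("6-10",0),("11+",0)] := by decide
  rw [hinit, pv_loop]
  have h := pv_total commits
  simp only [PySem.Dict.items, List.cons.injEq, Prod.mk.injEq, true_and, and_true,
    zero_add] at h ⊢
  omega
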